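-- pv_equiv track=rewrite | github.com/m1m0r1/galgo | galgo/tools/imgt.py | calc_edit_info
-- ===== SOURCE A (Python) =====
-- from builtins import filter, zip, range
--
-- def calc_edit_info(query_aln, ref_aln, ref_start=1): #TODO simplify
--     """
--     #        123 4567   890123456 789012 # offset
--     >>> q = 'ACGTCGTTTGG--GACC-GTTTATTCA'
--     >>> r = 'AAG-CGTT---ATGTCCAGT-TGTTAA'
--     >>> l = list(calc_edit_info(q, r, 3001))
--     >>> l[0]
--     (3002, 'A', 'C')
--     >>> l[1]
--     (3004, '', 'T')
--     >>> l[2]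
--     (3008, 'AT', 'TGG')
--     >>> l[3]
--     (3011, 'T', 'A')
--     >>> l[4]
--     (3014, 'A', '')
--     >>> l[5]
--     (3017, '', 'T')
--     >>> l[6]
--     (3018, 'G', 'A')
--     >>> l[7]
--     (3021, 'A', 'C')
--     """
--     assert len(query_aln) == len(ref_aln)
--     edits = []
--     offset = 0
--     apos = ref_start
--     for r, q in zip(ref_aln, query_aln):
--         if r != q:
--             edits.append((apos, offset, r.replace('-', ''), q.replace('-', '')))
--         if r == '-':
--             offset += 1
--         apos += 1
--
--     prev = -float('inf')
--     outs = []
--     for apos, offset, r, q in edits: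
--         if apos - prev == 1:
--             outs[-1]['ref'] += r
--             outs[-1]['query'] += q
--         else:
--             outs.append({'pos': apos - offset, 'ref': r, 'query': q})
--         prev = apos
--
--     return [(out['pos'], out['ref'], out['query']) for out in outs]
-- ===== SOURCE B (Python) =====
-- def calc_edit_info(query_aln, ref_aln, ref_start=1):
--     # single fused pass: merge adjacent edit columns as we go
--     outs = []
--     offset = 0
--     last = None   # column index (apos) of the most recent edit
--     apos = ref_start
--     for r, q in zip(ref_aln, query_aln):
--         if r != q:
--             rs = '' if r == '-' else r
--             qs = '' if q == '-' else q
--             if last is not None and apos == last + 1: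
--                 pos, pr, pq = outs[-1]
--                 outs[-1] = (pos, pr + rs, pq + qs)
--             else:
--                 outs.append((apos - offset, rs, qs))
--             last = apos
--         if r == '-':
--             offset += 1
--         apos += 1
--     return outs
-- ===== Notes on version B (the rewrite author's own statement) =====
-- stated objective: simpler
-- what changed: Replaced A's two sequential passes (collect raw (apos, offset, char) edits, then merge adjacent columns via dicts and a -inf sentinel) by one fused loop over zip(ref_aln, query_aln) that maintains the merged group list of tuples directly, extending the last group when the current column immediately follows the previous edit column. (single pass, no intermediate edits list or per-edit dicts)
import Mathlib
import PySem

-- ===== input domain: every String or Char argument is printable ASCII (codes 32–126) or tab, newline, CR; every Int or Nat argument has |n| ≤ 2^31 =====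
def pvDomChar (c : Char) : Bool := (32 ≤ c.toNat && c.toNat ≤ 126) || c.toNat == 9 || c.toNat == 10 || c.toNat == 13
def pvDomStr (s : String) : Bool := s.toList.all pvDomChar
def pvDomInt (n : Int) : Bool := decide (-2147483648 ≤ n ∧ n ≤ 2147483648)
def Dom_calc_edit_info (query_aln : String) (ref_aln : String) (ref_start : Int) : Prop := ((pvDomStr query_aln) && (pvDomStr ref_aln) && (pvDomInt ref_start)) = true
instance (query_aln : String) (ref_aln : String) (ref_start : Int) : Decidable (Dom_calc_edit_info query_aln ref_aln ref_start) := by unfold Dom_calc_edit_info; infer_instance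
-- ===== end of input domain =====

-- B fuses A's two passes into one loop over the zipped alignment ("simpler"); equality of return values is proved below.

-- ===== PORT A =====
-- r.replace('-', '') on a single character r: exact hand port
def pvStrip (c : Char) : String := if c = '-' then "" else String.singleton c

-- 'outs[-1]["ref"] += r; outs[-1]["query"] += q' — mutate the last group in place
def pvExtendLast (outs : List (Int × String × String)) (r q : String) :
    List (Int × String × String) :=
  match outs with
  | [] => []
  | [x] => [(x.1, x.2.1 ++ r, x.2.2 ++ q)]
  | x :: xs => x :: pvExtendLast xs r q

-- first loop body: state = (edits, offset, apos)
def pvStep1 (st : List (Int × Int × String × String) × Int × Int) (rq : Char × Char) :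
    List (Int × Int × String × String) × Int × Int :=
  let es := if rq.1 ≠ rq.2 then st.1 ++ [(st.2.2, st.2.1, pvStrip rq.1, pvStrip rq.2)] else st.1
  let off := if rq.1 = '-' then st.2.1 + 1 else st.2.1
  (es, off, st.2.2 + 1)

-- second loop body: state = (prev, outs); prev = none stands for -inf (then 'apos - prev == 1' is false)
def pvStep2 (st : Option Int × List (Int × String × String)) (e : Int × Int × String × String) :
    Option Int × List (Int × String × String) :=
  if (match st.1 with | none => false | some p => e.1 - p == 1) then
    (some e.1, pvExtendLast st.2 e.2.2.1 e.2.2.2)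
  else
    (some e.1, st.2 ++ [(e.1 - e.2.1, e.2.2.1, e.2.2.2)])

-- the dicts {'pos','ref','query'} with fixed keys are represented as tuples (pos, ref, query)
def calc_edit_info (query_aln : String) (ref_aln : String) (ref_start : Int) :
    List (Int × String × String) :=
  let edits := ((ref_aln.toList.zip query_aln.toList).foldl pvStep1 ([], 0, ref_start)).1
  (edits.foldl pvStep2 (none, [])).2

-- ===== PORT B =====
-- B's loop body: state = (outs, offset, last, apos)
def pvStepB (st : List (Int × String × String) × Int × Option Int × Int) (rq : Char × Char) :
    List (Int × String × String) × Int × Option Int × Int :=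
  let outs := st.1; let off := st.2.1; let last := st.2.2.1; let ap := st.2.2.2
  let r := rq.1; let q := rq.2
  let ol :=
    if r ≠ q then
      let rs := if r = '-' then "" else String.singleton r
      let qs := if q = '-' then "" else String.singleton q
      if (match last with | none => false | some l => ap == l + 1) then
        (pvExtendLast outs rs qs, some ap)
      else
        (outs ++ [(ap - off, rs, qs)], some ap)
    else (outs, last)
  (ol.1, (if r = '-' then off + 1 else off), ol.2, ap + 1)

def calc_edit_info_alt (query_aln : String) (ref_aln : String) (ref_start : Int) :
    List (Int × String × String) :=
  ((ref_aln.toList.zip query_aln.toList).foldl pvStepB ([], 0, none, ref_start)).1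

-- ===== PRECONDITION & SPEC =====
-- Pre_ excludes unequal-length alignments, on which A raises AssertionError
def Pre_calc_edit_info (query_aln : String) (ref_aln : String) (ref_start : Int) : Prop :=
  query_aln.toList.length = ref_aln.toList.length
instance (query_aln : String) (ref_aln : String) (ref_start : Int) : Decidable (Pre_calc_edit_info query_aln ref_aln ref_start) := by unfold Pre_calc_edit_info; infer_instance

def pvWitness_calc_edit_info : String × String × Int := ("AC-T", "AG-T", 1)

def Spec_calc_edit_info (query_aln : String) (ref_aln : String) (ref_start : Int) (out : List (Int × String × String)) : Prop := out = calc_edit_info_alt query_aln ref_aln ref_start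
instance (query_aln : String) (ref_aln : String) (ref_start : Int) (out : List (Int × String × String)) : Decidable (Spec_calc_edit_info query_aln ref_aln ref_start out) := by unfold Spec_calc_edit_info; infer_instance

-- ===== CLAIM (what is proved, stated in full; the proofs are below) =====
def Claim_equal_calc_edit_info : Prop := ∀ (query_aln : String) (ref_aln : String) (ref_start : Int), Dom_calc_edit_info query_aln ref_aln ref_start → Pre_calc_edit_info query_aln ref_aln ref_start → Spec_calc_edit_info query_aln ref_aln ref_start (calc_edit_info query_aln ref_aln ref_start)

-- ===== LEMMAS AND PROOFS =====

-- the glue: run A's second pass on the edits accumulated so far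
def pvG (s : List (Int × Int × String × String) × Int × Int) :
    List (Int × String × String) × Int × Option Int × Int :=
  let t := s.1.foldl pvStep2 (none, [])
  (t.2, s.2.1, t.1, s.2.2)

theorem pv_beq_sub (a p : Int) : (a - p == 1) = (a == p + 1) := by
  by_cases h : a = p + 1 <;> simp [h] <;> omega

theorem pvStepB_G (s : List (Int × Int × String × String) × Int × Int) (rq : Char × Char) :
    pvStepB (pvG s) rq = pvG (pvStep1 s rq) := by
  obtain ⟨es, off, ap⟩ := s
  obtain ⟨r, q⟩ := rq
  by_cases hrq : r = q
  · simp [pvG, pvStep1, pvStepB, hrq]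
  · simp only [pvG, pvStep1, pvStepB, hrq, if_pos, ne_eq, not_false_eq_true, if_true,
      List.foldl_append, List.foldl_cons, List.foldl_nil]
    rcases h : (es.foldl pvStep2 (none, ([] : List (Int × String × String)))).1 with _ | p
    · simp [pvStep2, h, pvStrip]
    · simp [pvStep2, h, pvStrip, pv_beq_sub]
      split_ifs <;> simp

theorem pv_fold_G (l : List (Char × Char)) (s : List (Int × Int × String × String) × Int × Int) :
    l.foldl pvStepB (pvG s) = pvG (l.foldl pvStep1 s) := by
  induction l generalizing s with
  | nil => rfl
  | cons x xs ih => simp [List.foldl_cons, pvStepB_G, ih]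

-- ===== VERDICT (by name: the statement is the Claim_ definition above) =====
theorem calc_edit_info_spec : Claim_equal_calc_edit_info := by
  intro query_aln ref_aln ref_start _ _
  unfold Spec_calc_edit_info calc_edit_info calc_edit_info_alt
  have h := pv_fold_G (ref_aln.toList.zip query_aln.toList) ([], 0, ref_start)
  have h0 : pvG ([], 0, ref_start) = ([], 0, none, ref_start) := rfl
  rw [h0] at h
  rw [h]
  simp [pvG]
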